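-- pv_equiv track=rewrite | github.com/zwep/domotica | adventofcode_2020/day20.py | find_tile_from_value
-- ===== SOURCE A (Python) =====
-- def find_tile_from_value(value_list, tile_numbers):
--     tile_dict = {}
--     for i_value in value_list:
--         for k, v in tile_numbers.items():
--             # We relate the value to the current tile.
--             if i_value in v:
--                 tile_dict.setdefault(k, [])
--                 tile_dict[k].append(i_value)
--     return tile_dict
-- ===== SOURCE B (Python) =====
-- def find_tile_from_value(value_list, tile_numbers):
--     # Inverted index: value -> list of tile keys containing it (tile insertion order).
--     index = {}
--     for k, v in tile_numbers.items():
--         for x in set(v):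
--             index.setdefault(x, []).append(k)
--     out = {}
--     for x in value_list:
--         for k in index.get(x, []):
--             out.setdefault(k, []).append(x)
--     return out
-- ===== Notes on version B (the rewrite author's own statement) =====
-- stated objective: faster
-- what changed: Instead of scanning every tile's value list for every value (membership test per (value, tile) pair), B builds an inverted index value->tiles in one pass over the tiles and then just looks each value up.
import Mathlib
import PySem

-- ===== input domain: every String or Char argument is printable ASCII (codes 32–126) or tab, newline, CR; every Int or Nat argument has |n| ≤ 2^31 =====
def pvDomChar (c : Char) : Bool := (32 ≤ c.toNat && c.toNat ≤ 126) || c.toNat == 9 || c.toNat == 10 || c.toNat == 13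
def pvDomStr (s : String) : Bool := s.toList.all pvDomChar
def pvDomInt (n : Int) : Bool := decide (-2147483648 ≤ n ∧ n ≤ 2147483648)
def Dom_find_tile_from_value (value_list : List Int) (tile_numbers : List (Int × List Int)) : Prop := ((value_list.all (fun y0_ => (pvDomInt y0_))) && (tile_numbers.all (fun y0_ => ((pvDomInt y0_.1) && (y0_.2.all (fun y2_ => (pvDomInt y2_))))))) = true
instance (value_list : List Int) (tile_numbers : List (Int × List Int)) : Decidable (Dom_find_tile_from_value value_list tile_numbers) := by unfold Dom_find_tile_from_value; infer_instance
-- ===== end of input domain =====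

-- B replaces A's per-value scan of every tile by an inverted index value -> tiles built once (objective: faster).

-- shared idiom: d.setdefault(k, []); d[k].append(x)
def pyAppendAt (d : PySem.Dict Int (List Int)) (k : Int) (x : Int) : PySem.Dict Int (List Int) :=
  (d.setdefault k []).modify k [] (· ++ [x])

-- ===== PORT A =====
def find_tile_from_value (value_list : List Int) (tile_numbers : List (Int × List Int)) : List (Int × List Int) :=
  (value_list.foldl (fun tile_dict i_value =>
      tile_numbers.foldl (fun tile_dict kv =>
          if i_value ∈ kv.2 then pyAppendAt tile_dict kv.1 i_value else tile_dict)
        tile_dict)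
    PySem.Dict.empty).items

-- ===== PORT B =====
def ftfv_index (tile_numbers : List (Int × List Int)) : PySem.Dict Int (List Int) :=
  tile_numbers.foldl (fun index kv =>
      (PySem.Set.ofList kv.2).foldl (fun index x => pyAppendAt index x kv.1) index)
    PySem.Dict.empty

def find_tile_from_value_alt (value_list : List Int) (tile_numbers : List (Int × List Int)) : List (Int × List Int) :=
  let index := ftfv_index tile_numbers
  (value_list.foldl (fun out x =>
      (index.getD x []).foldl (fun out k => pyAppendAt out k x) out)
    PySem.Dict.empty).items

-- ===== PRECONDITION & SPEC =====
def Spec_find_tile_from_value (value_list : List Int) (tile_numbers : List (Int × List Int)) (out : List (Int × List Int)) : Prop := out = find_tile_from_value_alt value_list tile_numbers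
instance (value_list : List Int) (tile_numbers : List (Int × List Int)) (out : List (Int × List Int)) : Decidable (Spec_find_tile_from_value value_list tile_numbers out) := by unfold Spec_find_tile_from_value; infer_instance

-- ===== CLAIM (what is proved, stated in full; the proofs are below) =====
def Claim_equal_find_tile_from_value : Prop := ∀ (value_list : List Int) (tile_numbers : List (Int × List Int)), Dom_find_tile_from_value value_list tile_numbers → Spec_find_tile_from_value value_list tile_numbers (find_tile_from_value value_list tile_numbers)

-- ===== LEMMAS AND PROOFS =====

theorem pyAppendAt_eq_modify (d : PySem.Dict Int (List Int)) (k x : Int) :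
    pyAppendAt d k x = d.modify k [] (· ++ [x]) := by
  unfold pyAppendAt
  by_cases h : d.contains k = true
  · rw [PySem.Dict.setdefault_of_contains d [] h]
  · rw [PySem.Dict.setdefault_of_not_contains d [] (by simpa using h)]
    show ((d.insert k []).insert k (((d.insert k []).getD k []) ++ [x])) = d.insert k ((d.getD k []) ++ [x])
    rw [PySem.Dict.getD_insert_self, PySem.Dict.insert_insert_self,
        PySem.Dict.getD_of_not_contains d [] (by simpa using h)]

theorem getD_pyAppendAt (d : PySem.Dict Int (List Int)) (k x j : Int) :
    (pyAppendAt d k x).getD j [] = if j = k then d.getD k [] ++ [x] else d.getD j [] := by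
  rw [pyAppendAt_eq_modify]
  exact PySem.Dict.getD_modify d k j [] (· ++ [x])

-- keys of the tiles containing x, in tile order
def keysFor (x : Int) (tile_numbers : List (Int × List Int)) : List Int :=
  tile_numbers.filterMap (fun kv => if x ∈ kv.2 then some kv.1 else none)

theorem inner_A_eq (x : Int) (tile_numbers : List (Int × List Int)) (d : PySem.Dict Int (List Int)) :
    tile_numbers.foldl (fun d kv => if x ∈ kv.2 then pyAppendAt d kv.1 x else d) d
      = (keysFor x tile_numbers).foldl (fun d k => pyAppendAt d k x) d := by
  induction tile_numbers generalizing d with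
  | nil => rfl
  | cons kv t ih =>
    by_cases h : x ∈ kv.2 <;> simp [keysFor, h, ih]

theorem getD_set_fold (s : List Int) (hnd : s.Nodup) (k : Int)
    (d : PySem.Dict Int (List Int)) (j : Int) :
    (s.foldl (fun d x => pyAppendAt d x k) d).getD j []
      = d.getD j [] ++ (if j ∈ s then [k] else []) := by
  induction s generalizing d with
  | nil => simp
  | cons y s ih =>
    have hy : y ∉ s := (List.nodup_cons.mp hnd).1
    have hs : s.Nodup := (List.nodup_cons.mp hnd).2
    simp only [List.foldl_cons, ih hs]
    rw [getD_pyAppendAt]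
    by_cases hjy : j = y
    · subst hjy
      simp [hy]
    · simp [hjy, List.mem_cons]

theorem getD_ftfv_index_fold (tile_numbers : List (Int × List Int)) (x : Int)
    (d : PySem.Dict Int (List Int)) :
    (tile_numbers.foldl (fun index kv =>
        (PySem.Set.ofList kv.2).foldl (fun index y => pyAppendAt index y kv.1) index) d).getD x []
      = d.getD x [] ++ keysFor x tile_numbers := by
  induction tile_numbers generalizing d with
  | nil => simp [keysFor]
  | cons kv t ih =>
    simp only [List.foldl_cons, ih]
    rw [getD_set_fold _ (PySem.Set.nodup_ofList kv.2)]
    by_cases h : x ∈ kv.2 <;>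
      simp [keysFor, h, PySem.Set.mem_ofList]

theorem getD_ftfv_index (tile_numbers : List (Int × List Int)) (x : Int) :
    (ftfv_index tile_numbers).getD x [] = keysFor x tile_numbers := by
  unfold ftfv_index
  rw [getD_ftfv_index_fold]
  simp

-- ===== VERDICT (by name: the statement is the Claim_ definition above) =====
theorem find_tile_from_value_spec : Claim_equal_find_tile_from_value := by
  intro value_list tile_numbers _
  show _ = _
  unfold find_tile_from_value find_tile_from_value_alt
  congr 1
  apply PySem.List.foldl_congr_mem
  intro d x _
  rw [inner_A_eq, getD_ftfv_index]
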